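-- pv_equiv track=rewrite | github.com/franklin1505/nouveau-back | courses/Estimations/helpers.py | apply_rule_overrides
-- ===== SOURCE A (Python) =====
-- def apply_rule_overrides(valid_rules):
--     """
--     Applique la logique d'écrasement des règles non-promo.
--     """
--     if not valid_rules:
--         return []
--
--     sorted_rules = sorted(valid_rules, key=lambda r: r["priority"], reverse=True)
--     from collections import OrderedDict
--
--     grouped_by_priority = OrderedDict()
--     for rule in sorted_rules:
--         prio = rule["priority"]
--         if prio not in grouped_by_priority:
--             grouped_by_priority[prio] = []
--         grouped_by_priority[prio].append(rule)
--
--     final_rules = []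
--     for priority_level, rules_at_this_priority in grouped_by_priority.items():
--         final_rules.extend(rules_at_this_priority)
--         if any(r["available_to_all"] for r in rules_at_this_priority):
--             break
--
--     return final_rules
-- ===== SOURCE B (Python) =====
-- def apply_rule_overrides(valid_rules):
--     """
--     Applique la logique d'écrasement des règles non-promo.
--     """
--     if not valid_rules:
--         return []
--
--     sorted_rules = sorted(valid_rules, key=lambda r: r["priority"], reverse=True)
--     truthy_priorities = [r["priority"] for r in valid_rules if r["available_to_all"]]
--     threshold = max(truthy_priorities, default=None)
--     if threshold is None:
--         return sorted_rules
--     return [r for r in sorted_rules if r["priority"] >= threshold]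
-- ===== Notes on version B (the rewrite author's own statement) =====
-- stated objective: simpler
-- what changed: Replaces A's OrderedDict grouping and accumulate-until-break loop over priority levels by computing the available_to_all priority cutoff with one max pass and filtering the sorted list by it.
import Mathlib
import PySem

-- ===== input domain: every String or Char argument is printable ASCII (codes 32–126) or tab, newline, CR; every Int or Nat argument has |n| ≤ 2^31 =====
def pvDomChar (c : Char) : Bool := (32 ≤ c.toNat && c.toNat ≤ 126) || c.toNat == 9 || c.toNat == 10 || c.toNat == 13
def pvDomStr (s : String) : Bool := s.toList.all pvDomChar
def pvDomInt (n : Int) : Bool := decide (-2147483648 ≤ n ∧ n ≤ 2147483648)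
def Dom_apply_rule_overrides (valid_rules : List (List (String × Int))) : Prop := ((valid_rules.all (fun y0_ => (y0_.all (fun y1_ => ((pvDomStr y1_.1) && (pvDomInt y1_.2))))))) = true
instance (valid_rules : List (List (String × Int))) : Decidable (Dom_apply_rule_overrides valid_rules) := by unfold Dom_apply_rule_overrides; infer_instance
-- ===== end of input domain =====

-- B replaces A's OrderedDict grouping and accumulate-until-break loop by one max pass (the
-- available_to_all priority cutoff) plus a filter over the sorted list: simpler decomposition.

-- ===== PORT A =====
-- a rule is a dict: r["priority"] / r["available_to_all"] looked up first-match (Pre_ guarantees presence)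
def pvKey (r : List (String × Int)) : Int := (PySem.Dict.mk r).getD "priority" 0

def pvTruthy (r : List (String × Int)) : Bool := (PySem.Dict.mk r).getD "available_to_all" 0 != 0

-- A's final loop: extend with the group, stop after the first group containing a truthy available_to_all
def pvLoopA : List (Int × List (List (String × Int))) → List (List (String × Int))
  | [] => []
  | (_, rs) :: rest => rs ++ (if rs.any pvTruthy then [] else pvLoopA rest)

def apply_rule_overrides (valid_rules : List (List (String × Int))) : List (List (String × Int)) :=
  if valid_rules = [] then []
  else
    let sorted_rules := PySem.List.sorted valid_rules pvKey true
    let grouped := sorted_rules.foldl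
      (fun d rule =>
        let prio := pvKey rule
        let d := if d.contains prio then d else d.insert prio ([] : List (List (String × Int)))
        d.modify prio [] (fun l => l ++ [rule]))
      PySem.Dict.empty
    pvLoopA grouped.items

-- ===== PORT B =====
def apply_rule_overrides_alt (valid_rules : List (List (String × Int))) : List (List (String × Int)) :=
  if valid_rules = [] then []
  else
    let sorted_rules := PySem.List.sorted valid_rules pvKey true
    let truthy_priorities := (valid_rules.filter pvTruthy).map pvKey
    match PySem.List.max? truthy_priorities (fun x => x) with
    | none => sorted_rules
    | some t => sorted_rules.filter (fun r => decide (t ≤ pvKey r))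

-- ===== PRECONDITION & SPEC =====
-- Pre_ excludes rules missing the "priority" or "available_to_all" key: A raises KeyError whenever
-- "priority" is missing or a rule examined before its break misses "available_to_all"; on the
-- remaining key-missing inputs A returns but B itself raises KeyError (B reads every rule's
-- "available_to_all" in its max pass), so those inputs are excluded too.
def Pre_apply_rule_overrides (valid_rules : List (List (String × Int))) : Prop :=
  (valid_rules.all (fun r =>
    (PySem.Dict.mk r).contains "priority" && (PySem.Dict.mk r).contains "available_to_all")) = true
instance (valid_rules : List (List (String × Int))) : Decidable (Pre_apply_rule_overrides valid_rules) := by unfold Pre_apply_rule_overrides; infer_instance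

def pvWitness_apply_rule_overrides : (List (List (String × Int))) :=
  [[("priority", 2), ("available_to_all", 1)], [("priority", 1), ("available_to_all", 0)]]

def Spec_apply_rule_overrides (valid_rules : List (List (String × Int))) (out : List (List (String × Int))) : Prop := out = apply_rule_overrides_alt valid_rules
instance (valid_rules : List (List (String × Int))) (out : List (List (String × Int))) : Decidable (Spec_apply_rule_overrides valid_rules out) := by unfold Spec_apply_rule_overrides; infer_instance

-- ===== CLAIM (what is proved, stated in full; the proofs are below) =====
def Claim_equal_apply_rule_overrides : Prop := ∀ (valid_rules : List (List (String × Int))), Dom_apply_rule_overrides valid_rules → Pre_apply_rule_overrides valid_rules → Spec_apply_rule_overrides valid_rules (apply_rule_overrides valid_rules)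

-- ===== LEMMAS AND PROOFS =====

-- shorthand for the items of A's grouped dict when the input is the (sorted) list s
def pvItemsOf (s : List (List (String × Int))) : List (Int × List (List (String × Int))) :=
  (PySem.Set.ofList (s.map pvKey)).map (fun k => (k, s.filter (fun r => pvKey r == k)))

-- B's tail, as a function of the sorted list
def pvRhs (s : List (List (String × Int))) : List (List (String × Int)) :=
  match PySem.List.max? ((s.filter pvTruthy).map pvKey) (fun x => x) with
  | none => s
  | some t => s.filter (fun r => decide (t ≤ pvKey r))

-- A's grouping step is a single Dict.modify
lemma pvStep_eq (d : PySem.Dict Int (List (List (String × Int)))) (rule : List (String × Int)) :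
    (let prio := pvKey rule
     let d' := if d.contains prio then d else d.insert prio ([] : List (List (String × Int)))
     d'.modify prio [] (fun l => l ++ [rule])) = d.modify (pvKey rule) [] (fun l => l ++ [rule]) := by
  show (if d.contains (pvKey rule) then d
        else d.insert (pvKey rule) ([] : List (List (String × Int)))).modify (pvKey rule) []
          (fun l => l ++ [rule]) = _
  by_cases h : d.contains (pvKey rule) = true
  · rw [if_pos h]
  · simp only [Bool.not_eq_true] at h
    rw [if_neg (by simp [h])]
    simp only [PySem.Dict.modify]
    rw [PySem.Dict.getD_insert_self, PySem.Dict.insert_insert_self,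
        PySem.Dict.getD_of_not_contains d [] h]

-- items of the grouped dict = first-occurrence distinct keys paired with their filters
lemma pvBuild_items (s : List (List (String × Int))) :
    (s.foldl
      (fun d rule =>
        let prio := pvKey rule
        let d := if d.contains prio then d else d.insert prio ([] : List (List (String × Int)))
        d.modify prio [] (fun l => l ++ [rule]))
      PySem.Dict.empty).items = pvItemsOf s := by
  rw [PySem.List.foldl_congr_mem _ _ (fun d rule => d.modify (pvKey rule) [] (fun l => l ++ [rule]))
      _ (fun acc x _ => pvStep_eq acc x)]
  have hkeys : (s.foldl (fun d rule => d.modify (pvKey rule) [] (fun l => l ++ [rule]))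
      PySem.Dict.empty).keys = PySem.Set.ofList (s.map pvKey) := by
    rw [PySem.Dict.keys_foldl_modify_key s pvKey [] (fun _ rule l => l ++ [rule]) PySem.Dict.empty]
    rw [PySem.Dict.keys_empty]
    rfl
  have hnodup : (s.foldl (fun d rule => d.modify (pvKey rule) [] (fun l => l ++ [rule]))
      PySem.Dict.empty).keys.Nodup := by
    apply PySem.Dict.nodup_keys_foldl_modify_key s pvKey [] (fun _ rule l => l ++ [rule])
    rw [PySem.Dict.keys_empty]; exact List.nodup_nil
  have hgetD : ∀ k, (s.foldl (fun d rule => d.modify (pvKey rule) [] (fun l => l ++ [rule]))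
      PySem.Dict.empty).getD k [] = s.filter (fun r => pvKey r == k) := by
    intro k
    have h1 : s.foldl (fun d rule => d.modify (pvKey rule) [] (fun l => l ++ [rule])) PySem.Dict.empty
        = (s.map (fun r => (pvKey r, r))).foldl (fun d p => d.modify p.1 [] (fun l => l ++ [p.2]))
          PySem.Dict.empty := by
      rw [List.foldl_map]
    rw [h1, PySem.Dict.getD_foldl_modify_append]
    rw [PySem.Dict.getD_empty, List.nil_append, List.filter_map, List.map_map]
    have : ((fun p : Int × List (String × Int) => p.1 == k) ∘ fun r => (pvKey r, r))
        = (fun r => pvKey r == k) := rfl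
    rw [this]
    have h2 : ((fun x : Int × List (String × Int) => x.2) ∘ fun r : List (String × Int) => (pvKey r, r)) = id := rfl
    rw [h2, List.map_id]
  rw [PySem.Dict.items_eq_map_keys _ hnodup []]
  rw [hkeys, pvItemsOf]
  exact List.map_congr_left (fun k _ => by rw [hgetD k])

-- the head of a dropWhile fails the predicate
lemma pvDropWhileHead {α : Type} (p : α → Bool) :
    ∀ (l : List α) (x : α) (xs : List α), l.dropWhile p = x :: xs → p x = false := by
  intro l
  induction l with
  | nil => intro x xs h; simp [List.dropWhile] at h
  | cons a t ih =>
    intro x xs h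
    rw [List.dropWhile_cons] at h
    by_cases hp : p a = true
    · rw [if_pos hp] at h; exact ih _ _ h
    · rw [if_neg hp] at h
      cases h
      simpa using hp

-- folding Set.add over elements already present is a no-op
lemma pvFoldlAdd_mem (l : List Int) (acc : PySem.Set Int) (h : ∀ y ∈ l, y ∈ acc) :
    l.foldl PySem.Set.add acc = acc := by
  induction l with
  | nil => rfl
  | cons a t ih =>
    have ha : a ∈ acc := h a (by simp)
    have : PySem.Set.add acc a = acc := by
      simp [PySem.Set.add, List.contains_eq_mem, ha]
    rw [List.foldl_cons, this]
    exact ih (fun y hy => h y (by simp [hy]))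

-- a head element not occurring in l passes through a Set.add fold
lemma pvFoldlAdd_cons (l : List Int) (acc : PySem.Set Int) (x : Int) (h : x ∉ l) :
    l.foldl PySem.Set.add (x :: acc) = x :: l.foldl PySem.Set.add acc := by
  induction l generalizing acc with
  | nil => rfl
  | cons a t ih =>
    have hax : a ≠ x := fun e => h (by simp [e])
    have : PySem.Set.add (x :: acc) a = x :: PySem.Set.add acc a := by
      simp [PySem.Set.add, List.contains_eq_mem, hax]
      by_cases hm : a ∈ acc <;> simp [hm]
    rw [List.foldl_cons, this, List.foldl_cons]
    exact ih _ (fun e => h (List.mem_cons_of_mem a e))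

-- Set.ofList of a constant block followed by a tail avoiding the constant
lemma pvOfList_block (x : Int) (l1 l2 : List Int)
    (h1 : ∀ y ∈ l1, y = x) (h2 : x ∉ l2) :
    PySem.Set.ofList (x :: (l1 ++ l2)) = x :: PySem.Set.ofList l2 := by
  have hof : PySem.Set.ofList (x :: (l1 ++ l2)) = (l1 ++ l2).foldl PySem.Set.add [x] := by
    rw [PySem.Set.ofList_eq_foldl]
    rfl
  rw [hof, List.foldl_append]
  rw [pvFoldlAdd_mem l1 [x] (fun y hy => by simp [h1 y hy])]
  rw [pvFoldlAdd_cons l2 [] x h2]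
  rw [PySem.Set.ofList_eq_foldl]

-- max? characterisation: an element bounding the list is the max
lemma pvMaxChar (l : List Int) (t : Int) (ht : t ∈ l) (hb : ∀ y ∈ l, y ≤ t) :
    PySem.List.max? l (fun x => x) = some t := by
  cases ho : PySem.List.max? l (fun x => x) with
  | none =>
    rw [PySem.List.max?_eq_none_iff] at ho
    subst ho; cases ht
  | some m =>
    have hm : m ∈ l := PySem.List.max?_mem ho
    have h1 : m ≤ t := hb m hm
    have h2 : t ≤ m := PySem.List.max?_isMax ho t ht
    rw [le_antisymm h1 h2]

-- max? (with the identity key) is invariant under permutation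
lemma pvMaxPerm (l l' : List Int) (h : l.Perm l') :
    PySem.List.max? l (fun x => x) = PySem.List.max? l' (fun x => x) := by
  cases ho : PySem.List.max? l (fun x => x) with
  | none =>
    rw [PySem.List.max?_eq_none_iff] at ho
    subst ho
    rw [List.nil_perm] at h
    subst h
    rfl
  | some m =>
    have hm : m ∈ l' := h.mem_iff.mp (PySem.List.max?_mem ho)
    exact (pvMaxChar l' m hm (fun y hy =>
      PySem.List.max?_isMax ho y (h.mem_iff.mpr hy))).symm

-- MAIN: on a key-descending list, A's group-then-break loop equals B's max-cutoff filter
lemma pvMain : ∀ (n : Nat) (s : List (List (String × Int))), s.length ≤ n →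
    List.Pairwise (fun a b => pvKey b ≤ pvKey a) s → pvLoopA (pvItemsOf s) = pvRhs s := by
  intro n
  induction n with
  | zero =>
    intro s hlen _
    have : s = [] := List.eq_nil_of_length_eq_zero (Nat.le_zero.mp hlen)
    subst this; rfl
  | succ n ih =>
    intro s hlen hs
    cases s with
    | nil => rfl
    | cons r0 s' =>
      obtain ⟨hle, hs'⟩ := List.pairwise_cons.mp hs
      set k0 := pvKey r0 with hk0
      set b' := s'.takeWhile (fun r => pvKey r == k0) with hb'
      set rest := s'.dropWhile (fun r => pvKey r == k0) with hrest
      have hsplit : b' ++ rest = s' := List.takeWhile_append_dropWhile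
      have hb'key : ∀ r ∈ b', pvKey r = k0 := fun r hr => by
        have := List.mem_takeWhile_imp hr
        exact beq_iff_eq.mp this
      have hrestle : ∀ r ∈ rest, pvKey r ≤ k0 := fun r hr =>
        hle r (hsplit ▸ List.mem_append_right b' hr)
      have hrestlt : ∀ r ∈ rest, pvKey r < k0 := by
        cases hr : rest with
        | nil => intro r hmem; simp at hmem
        | cons x xs =>
          have hx : (pvKey x == k0) = false := pvDropWhileHead _ s' x xs hr
          have hxlt : pvKey x < k0 :=
            lt_of_le_of_ne (hrestle x (by rw [hr]; simp)) (by simpa using hx)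
          have hprest : List.Pairwise (fun a b => pvKey b ≤ pvKey a) rest :=
            hs'.sublist (List.dropWhile_sublist _)
          rw [hr] at hprest
          obtain ⟨hxle, _⟩ := List.pairwise_cons.mp hprest
          intro r hmem
          rcases List.mem_cons.mp hmem with h | h
          · rw [h]; exact hxlt
          · exact lt_of_le_of_lt (hxle r h) hxlt
      have hbmem : ∀ r ∈ r0 :: b', pvKey r = k0 := by
        intro r hr
        rcases List.mem_cons.mp hr with h | h
        · rw [h]
        · exact hb'key r h
      -- the grouped items split off the top-priority block
      have hfiltk0 : (r0 :: s').filter (fun r => pvKey r == k0) = r0 :: b' := by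
        rw [← hsplit, List.filter_cons]
        simp only [← hk0, beq_self_eq_true, if_pos]
        rw [List.filter_append]
        have h1 : b'.filter (fun r => pvKey r == k0) = b' :=
          List.filter_eq_self.mpr (fun r hr => beq_iff_eq.mpr (hb'key r hr))
        have h2 : rest.filter (fun r => pvKey r == k0) = [] :=
          List.filter_eq_nil_iff.mpr (fun r hr => by
            simp only [beq_iff_eq]
            exact ne_of_lt (hrestlt r hr))
        rw [h1, h2, List.append_nil]
      have hofl : PySem.Set.ofList ((r0 :: s').map pvKey)
          = k0 :: PySem.Set.ofList (rest.map pvKey) := by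
        have : (r0 :: s').map pvKey = k0 :: (b'.map pvKey ++ rest.map pvKey) := by
          rw [List.map_cons, ← hsplit, List.map_append]
        rw [this]
        apply pvOfList_block
        · intro y hy
          obtain ⟨r, hr, hry⟩ := List.mem_map.mp hy
          rw [← hry]; exact hb'key r hr
        · intro hmem
          obtain ⟨r, hr, hry⟩ := List.mem_map.mp hmem
          exact absurd hry (ne_of_lt (hrestlt r hr))
      have hitems : pvItemsOf (r0 :: s') = (k0, r0 :: b') :: pvItemsOf rest := by
        rw [pvItemsOf, hofl, List.map_cons, hfiltk0, pvItemsOf]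
        congr 1
        apply List.map_congr_left
        intro k hk
        have hkmem : k ∈ rest.map pvKey := (PySem.Set.mem_ofList _ _).mp hk
        obtain ⟨rk, hrk, hrkk⟩ := List.mem_map.mp hkmem
        have hklt : k < k0 := hrkk ▸ hrestlt rk hrk
        congr 1
        rw [← hsplit, List.filter_cons]
        have : (pvKey r0 == k) = false := by
          simp only [beq_eq_false_iff_ne, ← hk0]
          exact (ne_of_lt hklt).symm
        rw [this]
        simp only [Bool.false_eq_true, if_false]
        rw [List.filter_append]
        have : b'.filter (fun r => pvKey r == k) = [] :=
          List.filter_eq_nil_iff.mpr (fun r hr => by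
            simp only [beq_iff_eq, hb'key r hr]
            exact (ne_of_lt hklt).symm)
        rw [this, List.nil_append]
      -- IH applies to rest
      have hrestlen : rest.length ≤ n := by
        have h1 : rest.length ≤ s'.length := List.length_dropWhile_le _ _
        have h2 : s'.length ≤ n := by simpa using Nat.lt_succ_iff.mp (Nat.lt_of_lt_of_le (by simp) hlen)
        omega
      have hih : pvLoopA (pvItemsOf rest) = pvRhs rest :=
        ih rest hrestlen (hs'.sublist (List.dropWhile_sublist _))
      rw [hitems]
      show (r0 :: b') ++ (if (r0 :: b').any pvTruthy then [] else pvLoopA (pvItemsOf rest))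
          = pvRhs (r0 :: s')
      cases hany : (r0 :: b').any pvTruthy with
      | true =>
        obtain ⟨r, hr, hrt⟩ := List.any_eq_true.mp hany
        have hmax : PySem.List.max? (((r0 :: s').filter pvTruthy).map pvKey) (fun x => x)
            = some k0 := by
          apply pvMaxChar
          · apply List.mem_map.mpr
            refine ⟨r, List.mem_filter.mpr ⟨?_, hrt⟩, hbmem r hr⟩
            rcases List.mem_cons.mp hr with h | h
            · rw [h]; simp
            · have : r ∈ s' := hsplit ▸ List.mem_append_left rest h
              simp [this]
          · intro y hy
            obtain ⟨r', hr', hry⟩ := List.mem_map.mp hy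
            have hr's : r' ∈ r0 :: s' := List.mem_of_mem_filter hr'
            rcases List.mem_cons.mp hr's with h | h
            · rw [← hry, h]
            · rw [← hry]; exact hle r' h
        rw [pvRhs, hmax]
        have : (r0 :: s').filter (fun r => decide (k0 ≤ pvKey r)) = r0 :: b' := by
          rw [← hsplit, List.filter_cons]
          simp only [← hk0, le_refl, decide_true, if_pos]
          rw [List.filter_append]
          have h1 : b'.filter (fun r => decide (k0 ≤ pvKey r)) = b' :=
            List.filter_eq_self.mpr (fun r hr => by simp [hb'key r hr])
          have h2 : rest.filter (fun r => decide (k0 ≤ pvKey r)) = [] :=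
            List.filter_eq_nil_iff.mpr (fun r hr => by
              simp only [decide_eq_true_eq, not_le]
              exact hrestlt r hr)
          rw [h1, h2, List.append_nil]
        simp [this]
      | false =>
        have hnone : ∀ r ∈ r0 :: b', pvTruthy r = false := by
          intro r hr
          have := List.any_eq_false.mp hany r hr
          simpa using this
        have hfp : (r0 :: s').filter pvTruthy = rest.filter pvTruthy := by
          rw [← hsplit, List.filter_cons]
          rw [hnone r0 (by simp)]
          simp only [Bool.false_eq_true, if_false]
          rw [List.filter_append]
          have : b'.filter pvTruthy = [] :=
            List.filter_eq_nil_iff.mpr (fun r hr => by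
              simp [hnone r (List.mem_cons_of_mem r0 hr)])
          rw [this, List.nil_append]
        rw [hih]
        simp only [Bool.false_eq_true, if_false, pvRhs]
        rw [hfp]
        cases hm : PySem.List.max? ((rest.filter pvTruthy).map pvKey) (fun x => x) with
        | none => rw [← hsplit]; simp
        | some t =>
          have htlt : t < k0 := by
            have hmem := PySem.List.max?_mem hm
            obtain ⟨r, hr, hrt⟩ := List.mem_map.mp hmem
            rw [← hrt]
            exact hrestlt r (List.mem_of_mem_filter hr)
          have : (r0 :: s').filter (fun r => decide (t ≤ pvKey r))
              = (r0 :: b') ++ rest.filter (fun r => decide (t ≤ pvKey r)) := by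
            rw [← hsplit, List.filter_cons]
            have hr0 : decide (t ≤ pvKey r0) = true := by
              simp only [decide_eq_true_eq, ← hk0]
              exact le_of_lt htlt
            rw [hr0]
            simp only [if_pos]
            rw [List.filter_append]
            have : b'.filter (fun r => decide (t ≤ pvKey r)) = b' :=
              List.filter_eq_self.mpr (fun r hr => by
                simp only [decide_eq_true_eq, hb'key r hr]
                exact le_of_lt htlt)
            rw [this]
            simp
          simp [this]

-- ===== VERDICT (by name: the statement is the Claim_ definition above) =====
theorem apply_rule_overrides_spec : Claim_equal_apply_rule_overrides := by
  intro valid_rules _ _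
  unfold Spec_apply_rule_overrides apply_rule_overrides apply_rule_overrides_alt
  by_cases hvr : valid_rules = []
  · simp [hvr]
  · simp only [if_neg hvr]
    rw [pvBuild_items]
    rw [pvMain (PySem.List.sorted valid_rules pvKey true).length _ le_rfl
        (PySem.List.sorted_pairwise_rev valid_rules pvKey)]
    rw [pvRhs]
    have hperm : (((PySem.List.sorted valid_rules pvKey true).filter pvTruthy).map pvKey).Perm
        ((valid_rules.filter pvTruthy).map pvKey) :=
      ((PySem.List.sorted_perm valid_rules pvKey true).filter pvTruthy).map pvKey
    rw [pvMaxPerm _ _ hperm]
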